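-- pv_equiv track=rewrite | github.com/Azure/Azure-Sentinel | Tools/Solutions Analyzer/solution_connector_tables.py | strip_pipe_command_blocks
-- ===== SOURCE A (Python) =====
-- from typing import Any, Dict, Iterable, List, Optional, Set, Tuple
--
-- PIPE_BLOCK_COMMANDS = {
--     "project",
--     "project-away",
--     "project-rename",
--     "extend",
--     "summarize",
--     "sort",
--     "order",
--     "top",
--     "take",
--     "limit",
--     "parse",
-- }
--
-- def strip_pipe_command_blocks(text: str) -> str:
--     if not text:
--         return text
--     lines = text.splitlines()
--     result: List[str] = []
--     skip_block = False
--     for line in lines: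
--         stripped = line.lstrip()
--         if skip_block:
--             if stripped.startswith("|"):
--                 skip_block = False
--             else:
--                 continue
--         if stripped.startswith("|"):
--             command_parts = stripped[1:].lstrip().split()
--             keyword = command_parts[0].lower() if command_parts else ""
--             extended_keyword = keyword
--             if keyword in {"order", "sort"} and len(command_parts) > 1:
--                 extended_keyword = f"{keyword} {command_parts[1].lower()}"
--             if keyword in PIPE_BLOCK_COMMANDS or extended_keyword in {"order by", "sort by"}:
--                 skip_block = True
--                 continue
--         result.append(line)
--     return "\n".join(result)
-- ===== SOURCE B (Python) =====
-- from typing import List, Optional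
--
-- PIPE_BLOCK_COMMANDS = {
--     "project",
--     "project-away",
--     "project-rename",
--     "extend",
--     "summarize",
--     "sort",
--     "order",
--     "top",
--     "take",
--     "limit",
--     "parse",
-- }
--
--
-- def _is_block_command(line: str) -> bool:
--     parts = line.lstrip()[1:].split()
--     return bool(parts) and parts[0].lower() in PIPE_BLOCK_COMMANDS
--
--
-- def strip_pipe_command_blocks(text: str) -> str:
--     # Segment decomposition: the run of lines before the first '|'-line, then one
--     # segment per '|'-line (the '|'-line plus its following non-'|' lines).
--     # Keep the initial run and every segment whose '|'-line is not a block command.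
--     first: List[str] = []
--     done: List[List[str]] = []
--     cur: Optional[List[str]] = None
--     for line in text.splitlines():
--         if line.lstrip().startswith("|"):
--             if cur is not None:
--                 done.append(cur)
--             cur = [line]
--         elif cur is not None:
--             cur.append(line)
--         else:
--             first.append(line)
--     if cur is not None:
--         done.append(cur)
--     kept = first + [ln for seg in done if not _is_block_command(seg[0]) for ln in seg]
--     return "\n".join(kept)
-- ===== Notes on version B (the rewrite author's own statement) =====
-- stated objective: alternative
-- what changed: Replaces the stateful skip-flag line scan with a segment decomposition: lines are grouped into the initial run plus one segment per pipe-command line, segments whose leading line is a block command are filtered out, and the survivors are flattened and joined; the keyword/extended-keyword test collapses into a single first-token predicate because the two sorting keywords are themselves already block commands.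
import Mathlib
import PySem

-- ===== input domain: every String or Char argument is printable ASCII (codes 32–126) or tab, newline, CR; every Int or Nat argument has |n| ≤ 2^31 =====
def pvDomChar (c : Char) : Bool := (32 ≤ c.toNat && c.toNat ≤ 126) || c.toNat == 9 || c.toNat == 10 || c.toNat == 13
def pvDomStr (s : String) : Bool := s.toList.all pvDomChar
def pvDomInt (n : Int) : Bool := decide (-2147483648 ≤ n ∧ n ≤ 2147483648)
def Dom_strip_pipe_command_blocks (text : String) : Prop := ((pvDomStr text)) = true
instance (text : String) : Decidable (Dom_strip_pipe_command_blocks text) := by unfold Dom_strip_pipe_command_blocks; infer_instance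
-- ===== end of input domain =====

-- B re-implements A by a segment decomposition (initial run + one segment per '|'-line,
-- filtered by a block-command predicate) instead of A's skip-flag scan; same return value.

-- ===== PORT A =====
def PIPE_BLOCK_COMMANDS : List String :=
  ["project", "project-away", "project-rename", "extend", "summarize", "sort",
   "order", "top", "take", "limit", "parse"]

-- A's inline block-command test, applied to 'stripped' (= line.lstrip())
def pvAcond (stripped : String) : Bool :=
  let command_parts := PySem.Str.split₀ (PySem.Str.lstrip (PySem.Str.slice stripped (some 1) none))
  let keyword := match command_parts with
    | [] => ""
    | p :: _ => PySem.Str.lower p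
  let extended_keyword :=
    if (keyword == "order" || keyword == "sort") && decide (command_parts.length > 1) then
      keyword ++ " " ++ PySem.Str.lower (command_parts.getD 1 "")  -- index 1 exists: guarded by length > 1
    else keyword
  PIPE_BLOCK_COMMANDS.contains keyword ||
    (extended_keyword == "order by" || extended_keyword == "sort by")

-- one iteration of A's loop; state = (result, skip_block)
def pvAstep (st : List String × Bool) (line : String) : List String × Bool :=
  let stripped := PySem.Str.lstrip line
  if st.2 && !(PySem.Str.startswith stripped "|") then st          -- skipping: 'continue'
  else if PySem.Str.startswith stripped "|" then
    if pvAcond stripped then (st.1, true)                          -- skip_block = True; 'continue'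
    else (st.1 ++ [line], false)
  else (st.1 ++ [line], false)

def strip_pipe_command_blocks (text : String) : String :=
  if text = "" then text
  else PySem.Str.join "\n" (((PySem.Str.splitlines text).foldl pvAstep ([], false)).1)

-- ===== PORT B =====
-- _is_block_command(line) of Source B
def pvIsBlockCmd (line : String) : Bool :=
  match PySem.Str.split₀ (PySem.Str.slice (PySem.Str.lstrip line) (some 1) none) with
  | [] => false
  | p :: _ => PIPE_BLOCK_COMMANDS.contains (PySem.Str.lower p)

-- one iteration of B's segmentation loop; state = (first, done, cur)
def pvBstep (st : List String × List (List String) × Option (List String)) (line : String) :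
    List String × List (List String) × Option (List String) :=
  if PySem.Str.startswith (PySem.Str.lstrip line) "|" then
    match st.2.2 with
    | some cur => (st.1, st.2.1 ++ [cur], some [line])
    | none => (st.1, st.2.1, some [line])
  else
    match st.2.2 with
    | some cur => (st.1, st.2.1, some (cur ++ [line]))
    | none => (st.1 ++ [line], st.2.1, none)

def strip_pipe_command_blocks_alt (text : String) : String :=
  let st := (PySem.Str.splitlines text).foldl pvBstep ([], [], none)
  let segments := match st.2.2 with | some cur => st.2.1 ++ [cur] | none => st.2.1
  -- segments are nonempty by construction; Python's seg[0] is seg.headD ""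
  let kept := st.1 ++ (segments.filter (fun seg => !pvIsBlockCmd (seg.headD ""))).flatten
  PySem.Str.join "\n" kept

-- ===== PRECONDITION & SPEC =====
def Spec_strip_pipe_command_blocks (text : String) (out : String) : Prop := out = strip_pipe_command_blocks_alt text
instance (text : String) (out : String) : Decidable (Spec_strip_pipe_command_blocks text out) := by unfold Spec_strip_pipe_command_blocks; infer_instance

-- ===== CLAIM (what is proved, stated in full; the proofs are below) =====
def Claim_equal_strip_pipe_command_blocks : Prop := ∀ (text : String), Dom_strip_pipe_command_blocks text → Spec_strip_pipe_command_blocks text (strip_pipe_command_blocks text)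

-- ===== LEMMAS AND PROOFS =====

-- line.lstrip().startswith('|'), the segmentation test shared by both loops
def pvPipe (line : String) : Bool := PySem.Str.startswith (PySem.Str.lstrip line) "|"

-- reference recursion: the lines A keeps, starting in skip state `skip`
def pvF : Bool → List String → List String
  | _, [] => []
  | skip, l :: ls =>
    if skip && !pvPipe l then pvF skip ls
    else if pvPipe l then (if pvIsBlockCmd l then pvF true ls else l :: pvF false ls)
    else l :: pvF false ls

-- split() ignores leading whitespace, so the extra .lstrip() in A is a no-op
theorem pv_split₀_go_lstrip (s : List Char) (acc : List (List Char)) :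
    PySem.Chars.split₀.go (List.dropWhile PySem.Chars.isspace s) [] acc = PySem.Chars.split₀.go s [] acc := by
  induction s generalizing acc with
  | nil => simp
  | cons c rest ih =>
    by_cases h : PySem.Chars.isspace c
    · rw [List.dropWhile_cons_of_pos h]
      conv_rhs => rw [PySem.Chars.split₀.go]
      simp [h, ih]
    · rw [List.dropWhile_cons_of_neg h]

theorem pv_split₀_lstrip (s : String) : PySem.Str.split₀ (PySem.Str.lstrip s) = PySem.Str.split₀ s := by
  apply List.map_injective_iff.mpr (fun a b => String.toList_inj.mp)
  rw [PySem.Str.split₀_map_toList, PySem.Str.split₀_map_toList, PySem.Str.toList_lstrip,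
    PySem.Chars.lstrip, PySem.Chars.split₀, PySem.Chars.split₀]
  exact pv_split₀_go_lstrip s.toList []

-- tokens produced by split() contain no whitespace characters
theorem pv_go_nospace (s cur : List Char) (acc : List (List Char))
    (hc : ∀ c ∈ cur, PySem.Chars.isspace c = false)
    (ha : ∀ t ∈ acc, ∀ c ∈ t, PySem.Chars.isspace c = false) :
    ∀ t ∈ PySem.Chars.split₀.go s cur acc, ∀ c ∈ t, PySem.Chars.isspace c = false := by
  induction s generalizing cur acc with
  | nil =>
    rw [PySem.Chars.split₀.go]
    split
    · simpa using ha
    · intro t ht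
      simp only [List.mem_reverse, List.mem_cons] at ht
      rcases ht with h | h
      · subst h; simpa using hc
      · exact ha t h
  | cons c rest ih =>
    rw [PySem.Chars.split₀.go]
    by_cases h : PySem.Chars.isspace c
    · simp only [h, if_true]
      split
      · exact ih [] acc (by simp) ha
      · refine ih [] _ (by simp) ?_
        intro t ht
        simp only [List.mem_cons] at ht
        rcases ht with h' | h'
        · subst h'; simpa using hc
        · exact ha t h'
    · simp only [h]
      refine ih (c :: cur) acc ?_ ha
      intro x hx
      rcases List.mem_cons.mp hx with h' | h'
      · subst h'; exact eq_false_of_ne_true h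
      · exact hc x h'

-- lower() maps no character onto a space
theorem pv_lowerChar_space (c : Char) (h : PySem.Chars.lowerChar c = ' ') : PySem.Chars.isspace c = true := by
  unfold PySem.Chars.lowerChar at h
  split at h
  · exfalso
    rename_i hu
    unfold PySem.Chars.isupper at hu
    have h1 : 65 ≤ c.toNat ∧ c.toNat ≤ 90 := by
      simp only [Bool.and_eq_true, decide_eq_true_eq, Char.le_def] at hu
      exact ⟨hu.1, hu.2⟩
    have h2 := congrArg Char.toNat h
    rw [Char.toNat_ofNat] at h2
    have hv : (c.toNat + 32).isValidChar := by
      constructor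
      omega
    rw [if_pos hv] at h2
    have : (' ').toNat = 32 := by decide
    omega
  · rw [h]; decide

-- hence a space-free token never lower()s to a two-word keyword
theorem pv_lower_ne_two_words (p : String) (h : ∀ c ∈ p.toList, PySem.Chars.isspace c = false) :
    PySem.Str.lower p ≠ "order by" ∧ PySem.Str.lower p ≠ "sort by" := by
  have key : ∀ w : String, (' ') ∈ w.toList → PySem.Str.lower p ≠ w := by
    intro w hw heq
    have ht : (PySem.Str.lower p).toList = w.toList := by rw [heq]
    rw [PySem.Str.toList_lower, PySem.Chars.lower] at ht
    rw [← ht] at hw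
    obtain ⟨c, hc, hcl⟩ := List.mem_map.mp hw
    have := pv_lowerChar_space c hcl
    rw [h c hc] at this
    exact Bool.false_ne_true this
  exact ⟨key _ (by decide), key _ (by decide)⟩

-- A's inline test agrees with B's predicate on every line
theorem pvAcond_eq (line : String) : pvAcond (PySem.Str.lstrip line) = pvIsBlockCmd line := by
  unfold pvAcond pvIsBlockCmd
  rw [pv_split₀_lstrip]
  cases hp : PySem.Str.split₀ (PySem.Str.slice (PySem.Str.lstrip line) (some 1) none) with
  | nil => decide
  | cons p rest =>
    have hp' : p.toList ∈ PySem.Chars.split₀ (PySem.Str.slice (PySem.Str.lstrip line) (some 1) none).toList := by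
      rw [← PySem.Str.split₀_map_toList, hp]
      exact List.mem_map_of_mem List.mem_cons_self
    have hpn := pv_go_nospace (PySem.Str.slice (PySem.Str.lstrip line) (some 1) none).toList [] []
      (by simp) (by simp) p.toList hp'
    obtain ⟨h1, h2⟩ := pv_lower_ne_two_words p hpn
    simp only
    by_cases hk : (PySem.Str.lower p == "order" || PySem.Str.lower p == "sort") = true
    · simp only [Bool.or_eq_true, beq_iff_eq] at hk
      rcases hk with h | h
      · rw [h]; simp [PIPE_BLOCK_COMMANDS]
      · rw [h]; simp [PIPE_BLOCK_COMMANDS]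
    · rw [Bool.not_eq_true] at hk
      simp [hk, beq_eq_false_iff_ne.mpr h1, beq_eq_false_iff_ne.mpr h2]

-- A's loop computes pvF
theorem pvA_fold (ls : List String) (acc : List String) (skip : Bool) :
    (ls.foldl pvAstep (acc, skip)).1 = acc ++ pvF skip ls := by
  induction ls generalizing acc skip with
  | nil => simp [pvF]
  | cons l ls ih =>
    rw [List.foldl_cons]
    by_cases hp : pvPipe l
    · have hp' : PySem.Str.startswith (PySem.Str.lstrip l) "|" = true := hp
      cases skip with
      | true =>
        by_cases hb : pvIsBlockCmd l
        · have hc : pvAcond (PySem.Str.lstrip l) = true := by rw [pvAcond_eq]; exact hb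
          simp only [pvAstep, hp', hc, Bool.not_true, Bool.and_false, if_true]
          rw [ih]
          simp [pvF, hp, hb]
        · have hc : pvAcond (PySem.Str.lstrip l) = false := by rw [pvAcond_eq]; exact (Bool.not_eq_true _).mp hb
          simp only [pvAstep, hp', hc, Bool.not_true, Bool.and_false, if_true]
          rw [ih]
          simp [pvF, hp, hb]
      | false =>
        by_cases hb : pvIsBlockCmd l
        · have hc : pvAcond (PySem.Str.lstrip l) = true := by rw [pvAcond_eq]; exact hb
          simp only [pvAstep, hp', hc, Bool.false_and, if_true]
          rw [ih]
          simp [pvF, hp, hb]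
        · have hc : pvAcond (PySem.Str.lstrip l) = false := by rw [pvAcond_eq]; exact (Bool.not_eq_true _).mp hb
          simp only [pvAstep, hp', hc, Bool.false_and, if_true]
          rw [ih]
          simp [pvF, hp, hb]
    · have hp' : PySem.Str.startswith (PySem.Str.lstrip l) "|" = false := (Bool.not_eq_true _).mp hp
      have hp2 : pvPipe l = false := hp'
      cases skip with
      | true =>
        simp only [pvAstep, hp', Bool.not_false, Bool.and_true, if_true]
        rw [ih]
        conv_rhs => rw [pvF]
        simp [hp2]
      | false =>
        simp only [pvAstep, hp', Bool.false_and]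
        rw [ih]
        conv_rhs => rw [pvF]
        simp [hp2]

-- B's final kept-lines expression, as a function of the loop state
def pvK (st : List String × List (List String) × Option (List String)) : List String :=
  let segments := match st.2.2 with | some cur => st.2.1 ++ [cur] | none => st.2.1
  st.1 ++ (segments.filter (fun seg => !pvIsBlockCmd (seg.headD ""))).flatten

-- B's loop, run from an open segment t, keeps t (iff its head is no block command) and then pvF
theorem pvB_fold_some (ls : List String) (first : List String) (done : List (List String))
    (t : List String) (ht : t ≠ []) :
    pvK (ls.foldl pvBstep (first, done, some t)) =
      first ++ (done.filter (fun seg => !pvIsBlockCmd (seg.headD ""))).flatten ++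
        (if pvIsBlockCmd (t.headD "") then pvF true ls else t ++ pvF false ls) := by
  induction ls generalizing done t with
  | nil =>
    simp only [List.foldl_nil, pvK, List.filter_append, List.flatten_append, pvF]
    by_cases hb : pvIsBlockCmd (t.headD "")
    · simp [List.headD_eq_head?_getD] at hb; simp [hb]
    · simp [List.headD_eq_head?_getD] at hb; simp [hb]
  | cons l ls ih =>
    rw [List.foldl_cons]
    by_cases hp : pvPipe l
    · have hp' : PySem.Str.startswith (PySem.Str.lstrip l) "|" = true := hp
      simp only [pvBstep, hp', if_true]
      rw [ih (done ++ [t]) [l] (by simp)]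
      by_cases hb : pvIsBlockCmd (t.headD "")
      · simp [List.headD_eq_head?_getD] at hb
        simp [hb, List.filter_append]
        conv_rhs => rw [pvF]
        simp [hp]
      · simp [List.headD_eq_head?_getD] at hb
        simp [hb, List.filter_append]
        conv_rhs => rw [pvF]
        simp [hp]
    · have hp' : PySem.Str.startswith (PySem.Str.lstrip l) "|" = false := (Bool.not_eq_true _).mp hp
      have hp2 : pvPipe l = false := hp'
      simp only [pvBstep, hp', Bool.false_eq_true, if_false]
      rw [ih done (t ++ [l]) (by simp)]
      have hh : (t ++ [l]).headD "" = t.headD "" := by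
        cases t with
        | nil => exact absurd rfl ht
        | cons a t' => rfl
      rw [hh]
      conv_rhs => rw [pvF]
      by_cases hb : pvIsBlockCmd (t.headD "")
      · simp [List.headD_eq_head?_getD] at hb
        simp [hp2, hb]
      · simp [List.headD_eq_head?_getD] at hb
        simp [hb]
        conv_rhs => rw [pvF]
        simp [hp2]

-- B's loop from the initial state computes pvF from skip state false
theorem pvB_fold_none (ls : List String) (first : List String) :
    pvK (ls.foldl pvBstep (first, [], none)) = first ++ pvF false ls := by
  induction ls generalizing first with
  | nil => simp [pvK, pvF]
  | cons l ls ih =>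
    rw [List.foldl_cons]
    by_cases hp : pvPipe l
    · have hp' : PySem.Str.startswith (PySem.Str.lstrip l) "|" = true := hp
      simp only [pvBstep, hp', if_true]
      rw [pvB_fold_some ls first [] [l] (by simp)]
      conv_rhs => rw [pvF]
      by_cases hb : pvIsBlockCmd l
      · simp [hp, hb]
      · simp [hp, hb]
    · have hp' : PySem.Str.startswith (PySem.Str.lstrip l) "|" = false := (Bool.not_eq_true _).mp hp
      have hp2 : pvPipe l = false := hp'
      simp only [pvBstep, hp', Bool.false_eq_true, if_false]
      rw [ih (first ++ [l])]
      conv_rhs => rw [pvF]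
      simp [hp2]

-- ===== VERDICT (by name: the statement is the Claim_ definition above) =====
theorem strip_pipe_command_blocks_spec : Claim_equal_strip_pipe_command_blocks := by
  intro text _
  unfold Spec_strip_pipe_command_blocks
  by_cases h : text = ""
  · subst h; decide
  · have hB : strip_pipe_command_blocks_alt text =
        PySem.Str.join "\n" (pvK ((PySem.Str.splitlines text).foldl pvBstep ([], [], none))) := rfl
    rw [strip_pipe_command_blocks, if_neg h, hB, pvB_fold_none,
      pvA_fold (PySem.Str.splitlines text) [] false]
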